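-- pv_equiv track=rewrite | github.com/zetaloop/leetcode-739 | TEST_baseCN.py | bytes_to_chinese_base
-- ===== SOURCE A (Python) =====
-- def bytes_to_chinese_base(bytes_data):
--     # 定义基础Unicode点
--     base_unicode = 0x4E00
--     # 将bytes转为二进制字符串
--     binary_str = ''.join(format(byte, '08b') for byte in bytes_data)
--     # 计算需要填充的位数
--     padding = (14 - (len(binary_str) % 14)) % 14
--     binary_str += '0' * padding
--     # 每14位分割
--     chunks = [binary_str[i:i+14] for i in range(0, len(binary_str), 14)]
--     # 编码到中文字符
--     chinese_str = ''.join(chr(base_unicode + int(chunk, 2)) for chunk in chunks)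
--     # 添加等号作为填充标志
--     padding_signs = '=' * (padding // 2)  # 每个等号代表两个字节
--     return chinese_str + padding_signs
-- ===== SOURCE B (Python) =====
-- def bytes_to_chinese_base(bytes_data):
--     # Single-pass bit accumulator: no binary string is ever built or sliced.
--     out = []
--     acc = 0
--     count = 0
--     for byte in bytes_data:
--         acc = acc * 256 + byte
--         count += 8
--         if count >= 14:  # at most one 14-bit chunk becomes available per byte
--             count -= 14
--             out.append(chr(0x4E00 + (acc >> count)))
--             acc &= (1 << count) - 1
--     pad = 0
--     if count > 0:
--         pad = 14 - count
--         out.append(chr(0x4E00 + (acc << pad)))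
--     return ''.join(out) + '=' * (pad // 2)
-- ===== Notes on version B (the rewrite author's own statement) =====
-- stated objective: alternative
-- what changed: Replaces the build-a-binary-string / re-slice-into-14-char-chunks / re-parse-each-chunk pipeline with a single pass over the bytes keeping an integer bit accumulator and a bit count, emitting one character whenever 14 bits are available.
-- outside the precondition, e.g. on bytes_to_chinese_base([300]): A returns '玀==', B returns '餀==='; on bytes_to_chinese_base([256, 1]): A returns '渀嘀=====', B returns '踀帀======'
import Mathlib
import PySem

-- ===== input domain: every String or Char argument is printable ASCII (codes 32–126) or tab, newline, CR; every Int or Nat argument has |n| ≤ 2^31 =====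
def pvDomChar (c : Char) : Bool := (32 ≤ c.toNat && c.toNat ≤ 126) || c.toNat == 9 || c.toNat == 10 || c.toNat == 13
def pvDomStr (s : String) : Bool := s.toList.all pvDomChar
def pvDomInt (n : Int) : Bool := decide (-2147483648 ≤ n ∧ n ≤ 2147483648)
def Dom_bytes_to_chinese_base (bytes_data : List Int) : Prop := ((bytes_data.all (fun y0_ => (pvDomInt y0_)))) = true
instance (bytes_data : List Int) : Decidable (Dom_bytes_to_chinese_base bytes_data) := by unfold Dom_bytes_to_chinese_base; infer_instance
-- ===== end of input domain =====

-- B replaces A's binary-string build / 14-char re-slicing / per-chunk int() parsing by one pass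
-- over the bytes with an integer bit accumulator and a bit count (objective: alternative).

-- ===== PORT A =====
-- bin(n) digits, no sign: '0' for 0, otherwise most significant bit first
def natBin (n : Nat) : List Char :=
  if n < 2 then [if n = 1 then '1' else '0']
  else natBin (n / 2) ++ [if n % 2 = 1 then '1' else '0']
  decreasing_by exact Nat.div_lt_self (by omega) (by omega)

-- format(byte, '08b'): zero-padded to total width 8 (a '-' sign counts toward the width)
def fmt8 (b : Int) : List Char :=
  if b < 0 then
    let s := natBin b.natAbs
    '-' :: (List.replicate (7 - s.length) '0' ++ s)
  else
    let s := natBin b.toNat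
    List.replicate (8 - s.length) '0' ++ s

-- value of a 0/1-digit string (most significant first)
def bitsVal (s : List Char) : Nat := s.foldl (fun a c => 2 * a + (if c = '1' then 1 else 0)) 0

-- int(chunk, 2): none exactly where Python raises ValueError (empty digits / non-binary char)
def parseBin? (s : List Char) : Option Int :=
  match s with
  | [] => none
  | c :: t =>
    if c = '-' then
      if t ≠ [] ∧ t.all (fun c => c = '0' || c = '1') then some (-(bitsVal t : Int)) else none
    else if (c :: t).all (fun c => c = '0' || c = '1') then some ((bitsVal (c :: t) : Nat) : Int) else none

-- [binary_str[i:i+14] for i in range(0, len(binary_str), 14)]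
def chunk14 (s : List Char) : List (List Char) :=
  if h : s = [] then [] else s.take 14 :: chunk14 (s.drop 14)
  termination_by s.length
  decreasing_by have := List.length_pos_of_ne_nil h; simp [List.length_drop]; omega

def bytes_to_chinese_base (bytes_data : List Int) : String :=
  let binary := bytes_data.flatMap fmt8                                -- ''.join(format(byte,'08b') …)
  let padding := (14 - binary.length % 14) % 14
  let padded := binary ++ List.replicate padding '0'
  let chinese := (chunk14 padded).map                                  -- ''.join(chr(base + int(chunk,2)) …)
      (fun c => Char.ofNat (0x4E00 + ((parseBin? c).getD 0)).toNat)    -- getD 0: 'none' = ValueError, excluded by Pre_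
  String.ofList (chinese ++ List.replicate (padding / 2) '=')          -- chinese_str + '=' * (padding // 2)

-- ===== PORT B =====
-- loop body of Source B (acc >> count is floor division by 2^count = Int >>>; acc & (1<<count)-1; both exact)
def stepB (st : List Char × Int × Int) (byte : Int) : List Char × Int × Int :=
  let acc := st.2.1 * 256 + byte
  let count := st.2.2 + 8
  if 14 ≤ count then
    let count := count - 14
    (st.1 ++ [Char.ofNat (0x4E00 + (acc >>> count.toNat)).toNat],
     PySem.Int.band acc ((1 : Int) <<< count.toNat - 1), count)
  else (st.1, acc, count)

def bytes_to_chinese_base_alt (bytes_data : List Int) : String :=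
  let st := bytes_data.foldl stepB ([], 0, 0)
  if 0 < st.2.2 then
    let pad := 14 - st.2.2
    String.ofList ((st.1 ++ [Char.ofNat (0x4E00 + (st.2.1 <<< pad.toNat)).toNat])
      ++ List.replicate (PySem.Int.floordiv pad 2).toNat '=')          -- '=' * (pad // 2)
  else String.ofList st.1

-- ===== PRECONDITION & SPEC =====
-- Pre_ restricts to the natural domain of the function: actual byte values 0..255.  Outside it
-- format(byte,'08b') is no longer 8 fixed bits (and may carry a '-' sign that makes int(chunk,2)
-- or chr() raise), so A's value there is an accident of variable-width formatting; B does not match it.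
def Pre_bytes_to_chinese_base (bytes_data : List Int) : Prop :=
  ∀ b ∈ bytes_data, 0 ≤ b ∧ b < 256
instance (bytes_data : List Int) : Decidable (Pre_bytes_to_chinese_base bytes_data) := by
  unfold Pre_bytes_to_chinese_base; infer_instance

def pvWitness_bytes_to_chinese_base : List Int := [72, 101, 108, 108, 111]

def Spec_bytes_to_chinese_base (bytes_data : List Int) (out : String) : Prop := out = bytes_to_chinese_base_alt bytes_data
instance (bytes_data : List Int) (out : String) : Decidable (Spec_bytes_to_chinese_base bytes_data out) := by unfold Spec_bytes_to_chinese_base; infer_instance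

-- ===== CLAIM (what is proved, stated in full; the proofs are below) =====
def Claim_equal_bytes_to_chinese_base : Prop := ∀ (bytes_data : List Int), Dom_bytes_to_chinese_base bytes_data → Pre_bytes_to_chinese_base bytes_data → Spec_bytes_to_chinese_base bytes_data (bytes_to_chinese_base bytes_data)

-- ===== LEMMAS AND PROOFS =====
def bits01 (s : List Char) : Prop := ∀ c ∈ s, c = '0' ∨ c = '1'

-- the characters A emits for the complete 14-bit chunks of the bit stream s
def emitted (s : List Char) : List Char :=
  if 14 ≤ s.length then Char.ofNat (0x4E00 + bitsVal (s.take 14)) :: emitted (s.drop 14) else []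
  termination_by s.length
  decreasing_by simp [List.length_drop]; omega

-- the leftover (< 14) bits of s
def residue (s : List Char) : List Char :=
  if 14 ≤ s.length then residue (s.drop 14) else s
  termination_by s.length
  decreasing_by simp [List.length_drop]; omega

theorem bitsVal_foldl (t : List Char) (a : Nat) :
    t.foldl (fun a c => 2 * a + (if c = '1' then 1 else 0)) a = a * 2 ^ t.length + bitsVal t := by
  induction t generalizing a with
  | nil => simp [bitsVal]
  | cons c t ih =>
    rw [List.foldl_cons, ih]
    have h : bitsVal (c :: t) = (2 * 0 + if c = '1' then 1 else 0) * 2 ^ t.length + bitsVal t := by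
      rw [bitsVal, List.foldl_cons, ih]
    rw [List.length_cons, h]; ring

theorem bitsVal_cons (c : Char) (t : List Char) :
    bitsVal (c :: t) = (if c = '1' then 1 else 0) * 2 ^ t.length + bitsVal t := by
  rw [bitsVal, List.foldl_cons, bitsVal_foldl]; simp

theorem bitsVal_append (s t : List Char) :
    bitsVal (s ++ t) = bitsVal s * 2 ^ t.length + bitsVal t := by
  conv_lhs => rw [bitsVal, List.foldl_append, bitsVal_foldl]
  rfl

theorem bitsVal_lt (s : List Char) : bitsVal s < 2 ^ s.length := by
  induction s with
  | nil => simp [bitsVal]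
  | cons c t ih =>
    rw [bitsVal_cons, List.length_cons, pow_succ]
    split_ifs <;> omega

theorem bitsVal_replicate_zero (k : Nat) : bitsVal (List.replicate k '0') = 0 := by
  induction k with
  | zero => simp [bitsVal]
  | succ k ih => rw [List.replicate_succ, bitsVal_cons, ih]; simp

theorem natBin_spec (n : Nat) : bits01 (natBin n) ∧ bitsVal (natBin n) = n ∧ 1 ≤ (natBin n).length := by
  fun_induction natBin n with
  | case1 n h =>
    refine ⟨?_, ?_, by simp⟩
    · intro c hc; simp at hc; subst hc; split_ifs <;> simp
    · interval_cases n <;> decide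
  | case2 n h ih =>
    obtain ⟨h01, hv, hl⟩ := ih
    refine ⟨?_, ?_, by simp⟩
    · intro c hc
      rcases List.mem_append.mp hc with h1 | h1
      · exact h01 c h1
      · simp at h1; subst h1; split_ifs <;> simp
    · rw [bitsVal_append, hv]
      have hb : bitsVal [if n % 2 = 1 then '1' else '0'] = n % 2 := by
        rcases Nat.mod_two_eq_zero_or_one n with hm | hm <;> rw [hm] <;> decide
      rw [hb]
      simp only [List.length_cons, List.length_nil]
      omega

theorem natBin_length_le (n k : Nat) (h : n < 2 ^ k) (hk : 1 ≤ k) : (natBin n).length ≤ k := by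
  induction k generalizing n with
  | zero => omega
  | succ k ih =>
    rw [natBin]
    by_cases h2 : n < 2
    · rw [if_pos h2]; simp
    · rw [if_neg h2]
      have hk1 : 1 ≤ k := by
        by_contra hc
        have hk0 : k = 0 := by omega
        subst hk0; simp at h; omega
      have hlt : n / 2 < 2 ^ k := by
        rw [pow_succ] at h; omega
      have := ih (n / 2) hlt hk1
      simp only [List.length_append, List.length_cons, List.length_nil]
      omega

theorem fmt8_spec (b : Int) (h0 : 0 ≤ b) (h1 : b < 256) :
    bits01 (fmt8 b) ∧ (fmt8 b).length = 8 ∧ bitsVal (fmt8 b) = b.toNat := by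
  have hneg : ¬ b < 0 := by omega
  obtain ⟨h01, hv, hl⟩ := natBin_spec b.toNat
  have hle : (natBin b.toNat).length ≤ 8 :=
    natBin_length_le b.toNat 8 (by omega) (by omega)
  rw [fmt8, if_neg hneg]
  refine ⟨?_, ?_, ?_⟩
  · intro c hc
    rcases List.mem_append.mp hc with h2 | h2
    · left; exact List.eq_of_mem_replicate h2
    · exact h01 c h2
  · simp only [List.length_append, List.length_replicate]; omega
  · rw [bitsVal_append, bitsVal_replicate_zero, hv]; simp

theorem parseBin?_bits (s : List Char) (hne : s ≠ []) (h01 : bits01 s) :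
    parseBin? s = some ((bitsVal s : Nat) : Int) := by
  match s with
  | [] => exact absurd rfl hne
  | c :: t =>
    have hc : c = '0' ∨ c = '1' := h01 c (by simp)
    have hcm : ¬ c = '-' := by rcases hc with h | h <;> subst h <;> decide
    have hall : (c :: t).all (fun c => c = '0' || c = '1') = true := by
      rw [List.all_eq_true]
      intro x hx
      rcases h01 x hx with h | h <;> subst h <;> decide
    rw [parseBin?.eq_def]
    simp only [hcm, if_false, hall, if_true]

theorem residue_length (s : List Char) : (residue s).length = s.length % 14 := by
  fun_induction residue s with
  | case1 s h ih => rw [ih, List.length_drop, Nat.mod_eq_sub_mod h]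
  | case2 s h => rw [Nat.mod_eq_of_lt (by omega)]

theorem residue_small (s : List Char) (h : s.length < 14) : residue s = s := by
  rw [residue, if_neg (by omega)]

theorem residue_append (s t : List Char) (h : 14 ≤ s.length) :
    residue (s ++ t) = residue (s.drop 14 ++ t) := by
  rw [residue, if_pos (by simp; omega), List.drop_append_of_le_length h]

theorem emitted_append (s t : List Char) (h : 14 ≤ s.length) :
    emitted (s ++ t) = Char.ofNat (0x4E00 + bitsVal (s.take 14)) :: emitted (s.drop 14 ++ t) := by
  rw [emitted, if_pos (by simp; omega), List.take_append_of_le_length h, List.drop_append_of_le_length h]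

theorem emitted_small (s : List Char) (h : s.length < 14) : emitted s = [] := by
  rw [emitted, if_neg (by omega)]

theorem div_pow_lemma (A B k : Nat) (h : B < 2^k) : (A * 2^k + B) / 2^k = A := by
  rw [mul_comm, Nat.mul_add_div (Nat.two_pow_pos k), Nat.div_eq_of_lt h]; omega

theorem loop_inv (l : List Int) (hl : ∀ b ∈ l, 0 ≤ b ∧ b < 256)
    (r : List Char) (h01 : bits01 r) (hlen : r.length < 14) (out : List Char) :
    l.foldl stepB (out, (bitsVal r : Int), (r.length : Int)) =
      (out ++ emitted (r ++ l.flatMap fmt8),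
       (bitsVal (residue (r ++ l.flatMap fmt8)) : Int),
       ((residue (r ++ l.flatMap fmt8)).length : Int)) := by
  induction l generalizing r out with
  | nil =>
    simp only [List.foldl_nil, List.flatMap_nil, List.append_nil,
      emitted_small r hlen, residue_small r hlen, List.append_nil]
  | cons b l' ih =>
    have hb := hl b (by simp)
    obtain ⟨hf01, hflen, hfval⟩ := fmt8_spec b hb.1 hb.2
    have h01' : bits01 (r ++ fmt8 b) := by
      intro c hc; rcases List.mem_append.mp hc with h | h
      · exact h01 c h
      · exact hf01 c h
    have hrflen : (r ++ fmt8 b).length = r.length + 8 := by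
      simp [hflen]
    have hacc : (bitsVal r : Int) * 256 + b = ((bitsVal (r ++ fmt8 b) : Nat) : Int) := by
      rw [bitsVal_append, hflen, hfval]
      push_cast; omega
    rw [List.foldl_cons]
    rw [List.flatMap_cons, ← List.append_assoc]
    by_cases hcase : 6 ≤ r.length
    · -- one 14-bit chunk is emitted
      have h14 : 14 ≤ (r ++ fmt8 b).length := by rw [hrflen]; omega
      have hcond : (14 : Int) ≤ (r.length : Int) + 8 := by omega
      have hk : ((r.length : Int) + 8 - 14).toNat = (r ++ fmt8 b).length - 14 := by
        rw [hrflen]; omega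
      set k := (r ++ fmt8 b).length - 14 with hkdef
      have hklt : k < 14 := by omega
      have hsplit : bitsVal (r ++ fmt8 b) =
          bitsVal ((r ++ fmt8 b).take 14) * 2 ^ k + bitsVal ((r ++ fmt8 b).drop 14) := by
        conv_lhs => rw [← List.take_append_drop 14 (r ++ fmt8 b)]
        rw [bitsVal_append, List.length_drop]
      have hdlt : bitsVal ((r ++ fmt8 b).drop 14) < 2 ^ k := by
        have := bitsVal_lt ((r ++ fmt8 b).drop 14)
        rwa [List.length_drop] at this
      have hshift : ((bitsVal (r ++ fmt8 b) : Nat) : Int) >>> k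
          = ((bitsVal ((r ++ fmt8 b).take 14) : Nat) : Int) := by
        rw [← Int.natCast_shiftRight, Nat.shiftRight_eq_div_pow, hsplit,
          div_pow_lemma _ _ _ hdlt]
      have hband : PySem.Int.band ((bitsVal (r ++ fmt8 b) : Nat) : Int) ((1 : Int) <<< k - 1)
          = ((bitsVal ((r ++ fmt8 b).drop 14) : Nat) : Int) := by
        have h1 : (1 : Int) <<< k - 1 = ((2 ^ k - 1 : Nat) : Int) := by
          rw [Int.shiftLeft_eq]
          push_cast [Nat.one_le_two_pow]; ring
        rw [h1, PySem.Int.band_natCast, Nat.and_two_pow_sub_one_eq_mod, hsplit,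
          Nat.mul_add_mod_self_right, Nat.mod_eq_of_lt hdlt]
      have hchar : ((0x4E00 : Int) + ((bitsVal ((r ++ fmt8 b).take 14) : Nat) : Int)).toNat
          = 0x4E00 + bitsVal ((r ++ fmt8 b).take 14) := by omega
      have hstep : stepB (out, (bitsVal r : Int), (r.length : Int)) b
          = (out ++ [Char.ofNat (0x4E00 + bitsVal ((r ++ fmt8 b).take 14))],
             ((bitsVal ((r ++ fmt8 b).drop 14) : Nat) : Int),
             (((r ++ fmt8 b).drop 14).length : Int)) := by
        simp only [stepB, hacc, if_pos hcond, hk]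
        rw [hshift, hband, hchar]
        have h3 : ((r.length : Int) + 8 - 14) = ((((r ++ fmt8 b).drop 14).length : Nat) : Int) := by
          rw [List.length_drop, hrflen]; omega
        rw [h3]
      rw [hstep]
      have hd01 : bits01 ((r ++ fmt8 b).drop 14) := fun c hc => h01' c (List.mem_of_mem_drop hc)
      have hdlen : ((r ++ fmt8 b).drop 14).length < 14 := by
        rw [List.length_drop]; omega
      rw [ih (fun x hx => hl x (by simp [hx])) _ hd01 hdlen]
      rw [emitted_append _ _ h14, residue_append _ _ h14]
      simp [List.append_assoc]
    · -- no chunk available yet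
      have hcond : ¬ (14 : Int) ≤ (r.length : Int) + 8 := by omega
      have hstep : stepB (out, (bitsVal r : Int), (r.length : Int)) b
          = (out, ((bitsVal (r ++ fmt8 b) : Nat) : Int), (((r ++ fmt8 b)).length : Int)) := by
        simp only [stepB, hacc, if_neg hcond, hrflen]
        push_cast; rfl
      rw [hstep]
      exact ih (fun x hx => hl x (by simp [hx])) _ h01' (by omega) out

theorem chunk14_append (s t : List Char) (h : 14 ≤ s.length) :
    chunk14 (s ++ t) = s.take 14 :: chunk14 (s.drop 14 ++ t) := by
  rw [chunk14, dif_neg (by intro hc; rcases List.append_eq_nil_iff.mp hc with ⟨h1, h2⟩; subst h1; simp at h),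
    List.take_append_of_le_length h, List.drop_append_of_le_length h]

theorem chunk14_nil : chunk14 [] = [] := by rw [chunk14]; simp

theorem charOf (x : Nat) : ((0x4E00 : Int) + ((x : Nat) : Int)).toNat = 0x4E00 + x := by omega

theorem chunks_eq (n : Nat) (s : List Char) (hn : s.length ≤ n) (h01 : bits01 s) :
    (chunk14 (s ++ List.replicate ((14 - s.length % 14) % 14) '0')).map
        (fun c => Char.ofNat (0x4E00 + ((parseBin? c).getD 0)).toNat)
      = emitted s ++
        (if s.length % 14 = 0 then []
         else [Char.ofNat (0x4E00 + bitsVal (residue s) * 2 ^ (14 - s.length % 14))]) := by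
  induction n generalizing s with
  | zero =>
    have hs : s = [] := List.eq_nil_of_length_eq_zero (by omega)
    subst hs
    simp [chunk14_nil, emitted_small]
  | succ n ih =>
    rcases Nat.lt_or_ge s.length 14 with hlt | hge
    · rcases Nat.eq_zero_or_pos s.length with hz | hpos
      · have hs : s = [] := List.eq_nil_of_length_eq_zero hz
        subst hs
        simp [chunk14_nil, emitted_small]
      · have hm : s.length % 14 = s.length := Nat.mod_eq_of_lt hlt
        have hp : (14 - s.length % 14) % 14 = 14 - s.length := by
          rw [hm, Nat.mod_eq_of_lt (by omega)]
        rw [hp]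
        set p := 14 - s.length with hpdef
        have hplen : (s ++ List.replicate p '0').length = 14 := by simp; omega
        have h01p : bits01 (s ++ List.replicate p '0') := by
          intro c hc
          rcases List.mem_append.mp hc with h | h
          · exact h01 c h
          · left; exact List.eq_of_mem_replicate h
        rw [chunk14, dif_neg (by intro hc; rw [hc] at hplen; simp at hplen),
          List.take_of_length_le (by omega), List.drop_eq_nil_of_le (by omega), chunk14_nil]
        rw [List.map_cons, List.map_nil]
        rw [parseBin?_bits _ (by intro hc; rw [hc] at hplen; simp at hplen) h01p]
        simp only [Option.getD_some, charOf]
        rw [bitsVal_append, bitsVal_replicate_zero, List.length_replicate]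
        rw [emitted_small s hlt, residue_small s hlt]
        rw [if_neg (by omega), hm]
        simp [hpdef]
    · have hmod : s.length % 14 = (s.drop 14).length % 14 := by
        rw [List.length_drop, Nat.mod_eq_sub_mod hge]
      have ht01 : bits01 (s.drop 14) := fun c hc => h01 c (List.mem_of_mem_drop hc)
      have htn : (s.drop 14).length ≤ n := by rw [List.length_drop]; omega
      have htake01 : bits01 (s.take 14) := fun c hc => h01 c (List.mem_of_mem_take hc)
      have htlen : (s.take 14).length = 14 := by rw [List.length_take]; omega
      rw [chunk14_append _ _ hge, List.map_cons]
      rw [parseBin?_bits _ (by intro hc; rw [hc] at htlen; simp at htlen) htake01]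
      simp only [Option.getD_some, charOf]
      rw [hmod, ih _ htn ht01]
      conv_rhs => rw [emitted, if_pos hge, residue, if_pos hge]
      rw [List.cons_append]

theorem ports_agree (bytes : List Int) (hpre : ∀ b ∈ bytes, 0 ≤ b ∧ b < 256) :
    bytes_to_chinese_base bytes = bytes_to_chinese_base_alt bytes := by
  have hs01 : bits01 (bytes.flatMap fmt8) := by
    intro c hc
    rcases List.mem_flatMap.mp hc with ⟨b, hb, hcb⟩
    exact ((fmt8_spec b (hpre b hb).1 (hpre b hb).2).1) c hcb
  have hloop := loop_inv bytes hpre [] (by intro c hc; simp at hc) (by simp) []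
  have h0 : ((bitsVal ([] : List Char) : Nat) : Int) = 0 := by decide
  rw [h0] at hloop
  simp only [List.length_nil, Nat.cast_zero, List.nil_append] at hloop
  simp only [bytes_to_chinese_base, bytes_to_chinese_base_alt, hloop]
  set s := bytes.flatMap fmt8 with hsdef
  rw [residue_length]
  set m := s.length % 14 with hmdef
  have hmlt : m < 14 := Nat.mod_lt _ (by omega)
  by_cases hm : m = 0
  · rw [if_neg (by rw [hm]; simp)]
    rw [chunks_eq s.length s le_rfl hs01, ← hmdef, if_pos hm, hm]
    simp
  · rw [if_pos (by exact_mod_cast Nat.pos_of_ne_zero hm)]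
    have hpad : (14 : Int) - (m : Int) = (((14 - m : Nat) : Nat) : Int) := by omega
    rw [hpad]
    have hshl : ((bitsVal (residue s) : Nat) : Int) <<< (((14 - m : Nat) : Int)).toNat
        = ((bitsVal (residue s) * 2 ^ (14 - m) : Nat) : Int) := by
      rw [Int.toNat_natCast, Int.shiftLeft_eq]
      push_cast; ring
    rw [hshl, charOf]
    have hdiv : (PySem.Int.floordiv (((14 - m : Nat) : Nat) : Int) 2).toNat = (14 - m) / 2 := by
      have : PySem.Int.floordiv (((14 - m : Nat) : Nat) : Int) 2 = (((14 - m) / 2 : Nat) : Int) := by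
        exact_mod_cast PySem.Int.floordiv_natCast (14 - m) 2
      rw [this, Int.toNat_natCast]
    rw [hdiv]
    rw [chunks_eq s.length s le_rfl hs01, ← hmdef, if_neg hm]
    have hp14 : (14 - m) % 14 = 14 - m := Nat.mod_eq_of_lt (by omega)
    rw [hp14]

-- ===== VERDICT (by name: the statement is the Claim_ definition above) =====
theorem bytes_to_chinese_base_spec : Claim_equal_bytes_to_chinese_base := by
  intro bytes_data _hdom hpre
  unfold Spec_bytes_to_chinese_base
  exact ports_agree bytes_data hpre
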